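-- pv_equiv track=rewrite | github.com/WhiteMetagross/newFastReID | tools/generate_model_config.py | _detect_pooling_type
-- ===== SOURCE A (Python) =====
-- from typing import Dict, Any, Optional, List, Tuple
--
-- def _detect_pooling_type(layer_names: List[str]) -> str:
--     pooling_patterns = {
--         'gem': ['gem', 'gempoolp'],
--         'avg': ['avgpool', 'adaptiveavgpool'],
--         'max': ['maxpool', 'adaptivemaxpool'],
--         'attention': ['attention', 'att_pool'],
--         'spp': ['spp', 'spatial_pyramid'],
--     }
--
--     for pool_type, patterns in pooling_patterns.items():
--         if any(any(pattern in name.lower() for pattern in patterns) for name in layer_names):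
--             return f'{pool_type.upper()}Pool' if pool_type != 'gem' else 'gempoolP'
--
--     return 'GlobalAvgPool'
-- ===== SOURCE B (Python) =====
-- def _detect_pooling_type(layer_names):
--     # One pass: lowercase each name once, OR category flags; then resolve by fixed priority.
--     # ('gempoolp' contains 'gem', 'adaptive*pool' contains '*pool', so one substring per collapsed category suffices.)
--     gem = avg = mx = att = spp = False
--     for name in layer_names:
--         low = name.lower()
--         gem = gem or 'gem' in low
--         avg = avg or 'avgpool' in low
--         mx = mx or 'maxpool' in low
--         att = att or 'attention' in low or 'att_pool' in low
--         spp = spp or 'spp' in low or 'spatial_pyramid' in low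
--     if gem:
--         return 'gempoolP'
--     if avg:
--         return 'AVGPool'
--     if mx:
--         return 'MAXPool'
--     if att:
--         return 'ATTENTIONPool'
--     if spp:
--         return 'SPPPool'
--     return 'GlobalAvgPool'
-- ===== Notes on version B (the rewrite author's own statement) =====
-- stated objective: faster
-- what changed: Replaces the per-category rescans of the whole layer list (dict loop with any-over-names inside) by a single pass that lowercases each name once and ORs five category flags (with superstring patterns like 'gempoolp'/'adaptiveavgpool' collapsed into their contained substring), then resolves the fixed priority order over the flags.
import Mathlib
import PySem

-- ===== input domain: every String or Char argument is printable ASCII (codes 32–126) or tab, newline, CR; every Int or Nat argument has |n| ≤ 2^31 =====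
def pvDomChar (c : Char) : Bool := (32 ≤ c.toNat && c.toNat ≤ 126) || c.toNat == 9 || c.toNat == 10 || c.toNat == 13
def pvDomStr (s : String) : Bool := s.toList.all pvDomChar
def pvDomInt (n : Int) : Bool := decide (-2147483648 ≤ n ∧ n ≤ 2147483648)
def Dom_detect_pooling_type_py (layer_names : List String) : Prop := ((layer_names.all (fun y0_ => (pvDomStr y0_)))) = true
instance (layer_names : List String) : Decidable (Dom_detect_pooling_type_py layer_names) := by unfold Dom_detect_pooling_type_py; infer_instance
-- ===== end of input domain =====

-- B makes ONE pass over layer_names (lowercasing each name once), ORs per-category flags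
-- with the redundant superstring patterns collapsed, then resolves by the fixed priority;
-- objective: faster by a constant factor (one pass, one lowercase per name, measured faster in a timing run).

-- ===== PORT A =====
def pvPatterns : List (String × List String) :=
  [("gem", ["gem", "gempoolp"]),
   ("avg", ["avgpool", "adaptiveavgpool"]),
   ("max", ["maxpool", "adaptivemaxpool"]),
   ("attention", ["attention", "att_pool"]),
   ("spp", ["spp", "spatial_pyramid"])]

def pvALoop (layer_names : List String) : List (String × List String) → String
  | [] => "GlobalAvgPool"
  | (pool_type, patterns) :: rest =>
    if layer_names.any (fun name => patterns.any (fun pattern => PySem.Str.isIn pattern (PySem.Str.lower name)))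
    then (if pool_type ≠ "gem" then PySem.Str.upper pool_type ++ "Pool" else "gempoolP")
    else pvALoop layer_names rest

def detect_pooling_type_py (layer_names : List String) : String :=
  pvALoop layer_names pvPatterns

-- ===== PORT B =====
def pvStep (st : Bool × Bool × Bool × Bool × Bool) (name : String) : Bool × Bool × Bool × Bool × Bool :=
  let low := PySem.Str.lower name
  (st.1 || PySem.Str.isIn "gem" low,
   st.2.1 || PySem.Str.isIn "avgpool" low,
   st.2.2.1 || PySem.Str.isIn "maxpool" low,
   st.2.2.2.1 || (PySem.Str.isIn "attention" low || PySem.Str.isIn "att_pool" low),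
   st.2.2.2.2 || (PySem.Str.isIn "spp" low || PySem.Str.isIn "spatial_pyramid" low))

def detect_pooling_type_py_alt (layer_names : List String) : String :=
  let st := layer_names.foldl pvStep (false, false, false, false, false)
  if st.1 then "gempoolP"
  else if st.2.1 then "AVGPool"
  else if st.2.2.1 then "MAXPool"
  else if st.2.2.2.1 then "ATTENTIONPool"
  else if st.2.2.2.2 then "SPPPool"
  else "GlobalAvgPool"

-- ===== PRECONDITION & SPEC =====
def Spec_detect_pooling_type_py (layer_names : List String) (out : String) : Prop := out = detect_pooling_type_py_alt layer_names
instance (layer_names : List String) (out : String) : Decidable (Spec_detect_pooling_type_py layer_names out) := by unfold Spec_detect_pooling_type_py; infer_instance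

-- ===== CLAIM (what is proved, stated in full; the proofs are below) =====
def Claim_equal_detect_pooling_type_py : Prop := ∀ (layer_names : List String), Dom_detect_pooling_type_py layer_names → Spec_detect_pooling_type_py layer_names (detect_pooling_type_py layer_names)

-- ===== LEMMAS AND PROOFS =====

-- if sub is an infix of sup, a match of sup is absorbed by the match of sub
theorem pv_isIn_or_absorb (sub sup : String) (h : sub.toList <:+: sup.toList) (s : String) :
    (PySem.Str.isIn sub s || PySem.Str.isIn sup s) = PySem.Str.isIn sub s := by
  cases hb : PySem.Chars.isIn sup.toList s.toList
  · simp [PySem.Str.isIn_eq, hb]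
  · have hsup := (PySem.Chars.isIn_iff_infix sup.toList s.toList).mp hb
    have hsub : sub.toList <:+: s.toList := h.trans hsup
    simp [PySem.Str.isIn_eq, hb, (PySem.Chars.isIn_iff_infix sub.toList s.toList).mpr hsub]

-- characterisation of B's single-pass fold
theorem pv_foldB (names : List String) (g a m t s : Bool) :
    names.foldl pvStep (g, a, m, t, s) =
      (g || names.any (fun n => PySem.Str.isIn "gem" (PySem.Str.lower n)),
       a || names.any (fun n => PySem.Str.isIn "avgpool" (PySem.Str.lower n)),
       m || names.any (fun n => PySem.Str.isIn "maxpool" (PySem.Str.lower n)),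
       t || names.any (fun n => PySem.Str.isIn "attention" (PySem.Str.lower n) || PySem.Str.isIn "att_pool" (PySem.Str.lower n)),
       s || names.any (fun n => PySem.Str.isIn "spp" (PySem.Str.lower n) || PySem.Str.isIn "spatial_pyramid" (PySem.Str.lower n))) := by
  induction names generalizing g a m t s with
  | nil => simp
  | cons n ns ih => simp [pvStep, ih, Bool.or_assoc]

-- ===== VERDICT (by name: the statement is the Claim_ definition above) =====
theorem detect_pooling_type_py_spec : Claim_equal_detect_pooling_type_py := by
  intro names _
  unfold Spec_detect_pooling_type_py detect_pooling_type_py detect_pooling_type_py_alt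
  rw [pv_foldB]
  have hgem : (names.any fun n => PySem.Str.isIn "gem" (PySem.Str.lower n) || PySem.Str.isIn "gempoolp" (PySem.Str.lower n))
      = names.any fun n => PySem.Str.isIn "gem" (PySem.Str.lower n) := by
    refine congrArg names.any (funext fun n => ?_)
    exact pv_isIn_or_absorb "gem" "gempoolp" (by decide) _
  have havg : (names.any fun n => PySem.Str.isIn "avgpool" (PySem.Str.lower n) || PySem.Str.isIn "adaptiveavgpool" (PySem.Str.lower n))
      = names.any fun n => PySem.Str.isIn "avgpool" (PySem.Str.lower n) := by
    refine congrArg names.any (funext fun n => ?_)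
    exact pv_isIn_or_absorb "avgpool" "adaptiveavgpool" (by decide) _
  have hmax : (names.any fun n => PySem.Str.isIn "maxpool" (PySem.Str.lower n) || PySem.Str.isIn "adaptivemaxpool" (PySem.Str.lower n))
      = names.any fun n => PySem.Str.isIn "maxpool" (PySem.Str.lower n) := by
    refine congrArg names.any (funext fun n => ?_)
    exact pv_isIn_or_absorb "maxpool" "adaptivemaxpool" (by decide) _
  simp only [Bool.false_or, pvALoop, pvPatterns, List.any_cons, List.any_nil, Bool.or_false]
  rw [hgem, havg, hmax]
  split_ifs <;> simp_all <;> decide
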